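-- pv_equiv track=rewrite | github.com/wzekai/ORCA | data_prepare/utils.py | separate_steps
-- ===== SOURCE A (Python) =====
-- def separate_steps(thoughts, delims=("wait", "Wait", "but", "But")):
--     """Split thinking trajectory into steps at delimiter lines."""
--     steps = [""]
--     for line in thoughts.split("\n"):
--         if not line:
--             continue
--         line = line + "\n"
--         if any(d in line for d in delims):
--             steps.append(line)
--         else:
--             steps[-1] += line
--     return [s.strip() for s in steps]
-- ===== SOURCE B (Python) =====
-- def separate_steps(thoughts, delims=("wait", "Wait", "but", "But")):
--     """Split thinking trajectory into steps at delimiter lines."""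
--     lines = [l for l in thoughts.split("\n") if l]
--     breaks = [i for i, l in enumerate(lines) if any(d in l + "\n" for d in delims)]
--     bounds = [0] + breaks + [len(lines)]
--     segments = [lines[a:b] for a, b in zip(bounds, bounds[1:])]
--     return ["\n".join(seg).strip() for seg in segments]
-- ===== Notes on version B (the rewrite author's own statement) =====
-- stated objective: alternative
-- what changed: A builds the steps in one forward loop that appends each line's text onto the last step string; B instead filters the non-empty lines, computes the list of delimiter-line breakpoint indices, carves the line list into slices at those breakpoints, and joins and strips each slice.
import Mathlib
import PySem

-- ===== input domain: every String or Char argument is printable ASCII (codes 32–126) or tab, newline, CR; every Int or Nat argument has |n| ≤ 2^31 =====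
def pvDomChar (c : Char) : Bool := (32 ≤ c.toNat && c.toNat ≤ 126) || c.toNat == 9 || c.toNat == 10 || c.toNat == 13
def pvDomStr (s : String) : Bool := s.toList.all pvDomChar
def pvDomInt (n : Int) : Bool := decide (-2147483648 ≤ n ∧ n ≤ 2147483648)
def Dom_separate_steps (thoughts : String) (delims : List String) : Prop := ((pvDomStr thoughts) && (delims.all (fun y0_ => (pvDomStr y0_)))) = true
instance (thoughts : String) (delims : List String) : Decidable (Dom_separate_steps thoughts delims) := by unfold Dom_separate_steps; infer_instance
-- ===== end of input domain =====

-- B replaces A's single accumulate-into-last-step loop by a breakpoint/slice decomposition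
-- (filter non-empty lines, list the delimiter-line indices, carve the line list at those
-- indices, join and strip each segment); objective: alternative decomposition, same cost.

-- ===== PORT A =====
def separate_steps (thoughts : String) (delims : List String) : List String :=
  (((PySem.Str.split? thoughts "\n").getD []).foldl
    (fun steps line =>
      if line = "" then steps
      else
        let line := line ++ "\n"
        if delims.any (fun d => PySem.Str.isIn d line) then steps ++ [line]
        else steps.dropLast ++ [steps.getLastD "" ++ line])
    [""]).map PySem.Str.strip

-- ===== PORT B =====
def separate_steps_alt (thoughts : String) (delims : List String) : List String :=
  let lines := ((PySem.Str.split? thoughts "\n").getD []).filter (fun l => l != "")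
  let breaks := ((PySem.List.enumerate lines).filter
      (fun p => delims.any (fun d => PySem.Str.isIn d (p.2 ++ "\n")))).map (fun p => p.1)
  let bounds := [(0 : Int)] ++ breaks ++ [(lines.length : Int)]
  let segments := (bounds.zip bounds.tail).map (fun p => PySem.List.slice lines (some p.1) (some p.2))
  segments.map (fun seg => PySem.Str.strip (PySem.Str.join "\n" seg))

-- ===== PRECONDITION & SPEC =====
def Spec_separate_steps (thoughts : String) (delims : List String) (out : List String) : Prop := out = separate_steps_alt thoughts delims
instance (thoughts : String) (delims : List String) (out : List String) : Decidable (Spec_separate_steps thoughts delims out) := by unfold Spec_separate_steps; infer_instance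

-- ===== CLAIM (what is proved, stated in full; the proofs are below) =====
def Claim_equal_separate_steps : Prop := ∀ (thoughts : String) (delims : List String), Dom_separate_steps thoughts delims → Spec_separate_steps thoughts delims (separate_steps thoughts delims)

-- ===== LEMMAS AND PROOFS =====

-- "line is a delimiter line": some delimiter occurs in line + "\n"
def pvBrk (delims : List String) (l : String) : Bool :=
  delims.any (fun d => PySem.Str.isIn d (l ++ "\n"))

-- prepend a line onto the first segment
def pvModHead (l : String) : List (List String) → List (List String)
  | [] => [[l]]
  | x :: xs => (l :: x) :: xs

-- reference grouping of the (already filtered) lines into segments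
def pvSeg (delims : List String) : List String → List (List String)
  | [] => [[]]
  | l :: ls =>
    if pvBrk delims l then [] :: pvModHead l (pvSeg delims ls)
    else pvModHead l (pvSeg delims ls)

-- concatenation of lines, each terminated by "\n" (A's step strings before strip)
def pvCat : List String → String
  | [] => ""
  | l :: ls => l ++ "\n" ++ pvCat ls

def pvSliceSeg (lines : List String) (bounds : List Int) : List (List String) :=
  (bounds.zip bounds.tail).map (fun p => PySem.List.slice lines (some p.1) (some p.2))

def pvBreaks (delims : List String) (ls : List String) (s : Int) : List Int :=
  ((PySem.List.enumerate ls s).filter (fun p => pvBrk delims p.2)).map (fun p => p.1)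


theorem pvSeg_ne_nil (delims : List String) (ls : List String) : pvSeg delims ls ≠ [] := by
  induction ls with
  | nil => simp [pvSeg]
  | cons l ls ih =>
    unfold pvSeg
    cases h : pvSeg delims ls with
    | nil => exact absurd h ih
    | cons x xs =>
      by_cases hb : pvBrk delims l <;> simp [hb, pvModHead]

theorem pvBreaks_shift (delims : List String) (ls : List String) (s : Int) :
    pvBreaks delims ls s = (pvBreaks delims ls 0).map (· + s) := by
  induction ls generalizing s with
  | nil => simp [pvBreaks, PySem.List.enumerate_nil]
  | cons l ls ih =>
    have h1 := ih (s + 1)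
    have h2 := ih 1
    simp only [pvBreaks, PySem.List.enumerate_cons] at h1 h2 ⊢
    by_cases hb : pvBrk delims l <;>
      simp [hb, h1, h2, List.map_map, Function.comp] <;>
      (intros; omega)

theorem pvBreaks_mem (delims : List String) (ls : List String) (c : Int)
    (h : c ∈ pvBreaks delims ls 0) : 0 ≤ c := by
  simp only [pvBreaks, List.mem_map] at h
  obtain ⟨p, hp, rfl⟩ := h
  have hmem := List.mem_of_mem_filter hp
  rw [PySem.List.mem_enumerate_iff] at hmem
  obtain ⟨k, hk, rfl⟩ := hmem
  simp

theorem pvBreaks_cons (delims : List String) (l : String) (ls : List String) :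
    pvBreaks delims (l :: ls) 0
      = (if pvBrk delims l then [(0 : Int)] else []) ++ (pvBreaks delims ls 0).map (· + 1) := by
  have h2 := pvBreaks_shift delims ls 1
  simp only [pvBreaks, PySem.List.enumerate_cons] at h2 ⊢
  by_cases hb : pvBrk delims l <;> simp [hb, zero_add] at h2 ⊢ <;> rw [h2]

theorem pvSlice_zero_zero (xs : List String) :
    PySem.List.slice xs (some 0) (some 0) = [] := by
  have h0 : (0 : Int) = ((0 : Nat) : Int) := rfl
  rw [h0, PySem.List.slice_natCast]
  simp

theorem pvSlice_zero_succ (l : String) (ls : List String) (b : Int) (hb : 0 ≤ b) :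
    PySem.List.slice (l :: ls) (some 0) (some (b + 1))
      = l :: PySem.List.slice ls (some 0) (some b) := by
  obtain ⟨n, rfl⟩ := Int.eq_ofNat_of_zero_le hb
  have h0 : (0 : Int) = ((0 : Nat) : Int) := rfl
  have h2 : (n : Int) + 1 = ((n + 1 : Nat) : Int) := by push_cast; ring
  rw [h0, h2, PySem.List.slice_natCast, PySem.List.slice_natCast]
  simp

theorem pvSlice_succ (l : String) (ls : List String) (a b : Int) (ha : 0 ≤ a) (hb : 0 ≤ b) :
    PySem.List.slice (l :: ls) (some (a + 1)) (some (b + 1))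
      = PySem.List.slice ls (some a) (some b) := by
  obtain ⟨m, rfl⟩ := Int.eq_ofNat_of_zero_le ha
  obtain ⟨n, rfl⟩ := Int.eq_ofNat_of_zero_le hb
  have h1 : (m : Int) + 1 = ((m + 1 : Nat) : Int) := by push_cast; ring
  have h2 : (n : Int) + 1 = ((n + 1 : Nat) : Int) := by push_cast; ring
  rw [h1, h2, PySem.List.slice_natCast, PySem.List.slice_natCast]
  simp [Nat.succ_sub_succ]

theorem pvSliceSeg_cons2 (xs : List String) (a b : Int) (rest : List Int) :
    pvSliceSeg xs (a :: b :: rest)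
      = PySem.List.slice xs (some a) (some b) :: pvSliceSeg xs (b :: rest) := by
  simp [pvSliceSeg, List.zip_cons_cons]

theorem pvSliceSeg_cons (l : String) (ls : List String) (cs : List Int)
    (h : ∀ c ∈ cs, 0 ≤ c) (hne : cs ≠ []) :
    pvSliceSeg (l :: ls) (0 :: cs.map (· + 1)) = pvModHead l (pvSliceSeg ls (0 :: cs)) := by
  cases cs with
  | nil => exact absurd rfl hne
  | cons c cs' =>
    have hc : 0 ≤ c := h c (List.mem_cons_self ..)
    rw [List.map_cons, pvSliceSeg_cons2, pvSliceSeg_cons2]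
    rw [pvSlice_zero_succ l ls c hc]
    have hrest : pvSliceSeg (l :: ls) ((c + 1) :: cs'.map (· + 1))
        = pvSliceSeg ls (c :: cs') := by
      show ((((c :: cs').map (· + 1)).zip (((c :: cs').map (· + 1)).tail)).map _) = _
      rw [← List.map_tail, List.zip_map]
      unfold pvSliceSeg
      rw [List.map_map]
      refine List.map_congr_left ?_
      rintro ⟨a, b⟩ hab
      obtain ⟨ha, hb⟩ := List.of_mem_zip hab
      have ha' : 0 ≤ a := h a ha
      have hb' : 0 ≤ b := h b (List.mem_cons_of_mem c hb)
      simp only [Function.comp, Prod.map]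
      exact pvSlice_succ l ls a b ha' hb'
    rw [hrest]
    cases hcc : pvSliceSeg ls (c :: cs') with
    | nil => simp [pvModHead]
    | cons x xs => simp [pvModHead]

theorem pvSliceSeg_eq_pvSeg (delims : List String) (ls : List String) :
    pvSliceSeg ls (0 :: (pvBreaks delims ls 0 ++ [(ls.length : Int)])) = pvSeg delims ls := by
  induction ls with
  | nil =>
    simp only [pvBreaks, PySem.List.enumerate_nil, List.filter_nil, List.map_nil,
      List.nil_append, List.length_nil, Nat.cast_zero]
    rw [pvSliceSeg_cons2, pvSlice_zero_zero]
    simp [pvSliceSeg, pvSeg]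
  | cons l ls ih =>
    have hnn : ∀ c ∈ pvBreaks delims ls 0 ++ [(ls.length : Int)], 0 ≤ c := by
      intro c hc
      rcases List.mem_append.1 hc with h | h
      · exact pvBreaks_mem delims ls c h
      · simp at h; omega
    rw [pvBreaks_cons]
    by_cases hb : pvBrk delims l
    · have hlist : (0 : Int) :: ((((if pvBrk delims l then [(0:Int)] else []) ++ (pvBreaks delims ls 0).map (· + 1))) ++ [((l :: ls).length : Int)])
          = 0 :: 0 :: (pvBreaks delims ls 0 ++ [(ls.length : Int)]).map (· + 1) := by
        simp [hb, List.map_append]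
      rw [hlist, pvSliceSeg_cons2, pvSlice_zero_zero,
        pvSliceSeg_cons l ls _ hnn (by simp), ih]
      simp [pvSeg, hb]
    · have hlist : (0 : Int) :: ((((if pvBrk delims l then [(0:Int)] else []) ++ (pvBreaks delims ls 0).map (· + 1))) ++ [((l :: ls).length : Int)])
          = 0 :: (pvBreaks delims ls 0 ++ [(ls.length : Int)]).map (· + 1) := by
        simp [hb, List.map_append]
      rw [hlist, pvSliceSeg_cons l ls _ hnn (by simp), ih]
      simp [pvSeg, hb]

theorem pvB_eq (thoughts : String) (delims : List String) :
    separate_steps_alt thoughts delims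
      = (pvSeg delims (((PySem.Str.split? thoughts "\n").getD []).filter (fun l => l != ""))).map
          (fun seg => PySem.Str.strip (PySem.Str.join "\n" seg)) := by
  unfold separate_steps_alt
  rw [← pvSliceSeg_eq_pvSeg delims]
  rfl

theorem pvA_fold (delims : List String) (ls : List String) (done : List String) (cur : String) :
    ls.foldl
      (fun steps line =>
        if pvBrk delims line then steps ++ [line ++ "\n"]
        else steps.dropLast ++ [steps.getLastD "" ++ (line ++ "\n")])
      (done ++ [cur])
    = done ++ (cur ++ pvCat ((pvSeg delims ls).headI)) :: ((pvSeg delims ls).tail.map pvCat) := by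
  induction ls generalizing done cur with
  | nil => simp [pvSeg, pvCat, String.append_empty]
  | cons l ls ih =>
    obtain ⟨hd, tl, hseg⟩ : ∃ hd tl, pvSeg delims ls = hd :: tl := by
      cases hs : pvSeg delims ls with
      | nil => exact absurd hs (pvSeg_ne_nil delims ls)
      | cons a b => exact ⟨a, b, rfl⟩
    simp only [List.foldl_cons]
    by_cases hb : pvBrk delims l
    · rw [if_pos hb]
      have h := ih (done ++ [cur]) (l ++ "\n")
      rw [h, hseg]
      simp [pvSeg, hb, hseg, pvModHead, pvCat, String.append_empty, List.append_assoc,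
        String.append_assoc]
    · rw [if_neg hb, List.dropLast_concat, List.getLastD_concat]
      have h := ih done (cur ++ (l ++ "\n"))
      rw [h, hseg]
      simp [pvSeg, hb, hseg, pvModHead, pvCat, String.append_assoc]

theorem pvA_eq (thoughts : String) (delims : List String) :
    separate_steps thoughts delims
      = ((pvSeg delims (((PySem.Str.split? thoughts "\n").getD []).filter (fun l => l != ""))).map
          pvCat).map PySem.Str.strip := by
  unfold separate_steps
  have hfun : (fun (steps : List String) (line : String) =>
      if line = "" then steps
      else
        let line := line ++ "\n"
        if delims.any (fun d => PySem.Str.isIn d line) then steps ++ [line]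
        else steps.dropLast ++ [steps.getLastD "" ++ line])
    = (fun (steps : List String) (line : String) =>
        if (line != "") = true then
          (fun (steps : List String) (line : String) =>
            if pvBrk delims line then steps ++ [line ++ "\n"]
            else steps.dropLast ++ [steps.getLastD "" ++ (line ++ "\n")]) steps line
        else steps) := by
    funext steps line
    by_cases hl : line = "" <;> simp [hl, pvBrk]
  rw [hfun, ← List.foldl_filter]
  obtain ⟨hd, tl, hseg⟩ : ∃ hd tl,
      pvSeg delims (((PySem.Str.split? thoughts "\n").getD []).filter (fun l => l != "")) = hd :: tl := by
    cases hs : pvSeg delims (((PySem.Str.split? thoughts "\n").getD []).filter (fun l => l != "")) with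
    | nil => exact absurd hs (pvSeg_ne_nil delims _)
    | cons a b => exact ⟨a, b, rfl⟩
  have h := pvA_fold delims (((PySem.Str.split? thoughts "\n").getD []).filter (fun l => l != "")) [] ""
  simp only [List.nil_append] at h
  rw [h, hseg]
  simp [String.empty_append]

theorem pvStrip_append_nl (s : String) :
    PySem.Str.strip (s ++ "\n") = PySem.Str.strip s := by
  apply String.ext
  rw [PySem.Str.toList_strip, PySem.Str.toList_strip, String.toList_append]
  rw [show ("\n" : String).toList = ['\n'] from rfl]
  unfold PySem.Chars.strip PySem.Chars.lstrip PySem.Chars.rstrip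
  rw [List.dropWhile_append]
  by_cases he : (List.dropWhile PySem.Chars.isspace s.toList).isEmpty
  · rw [List.isEmpty_iff] at he
    simp [he, List.dropWhile_cons_of_pos (show PySem.Chars.isspace '\n' = true by decide)]
  · rw [if_neg (by simp [he])]
    rw [List.reverse_append]
    rw [show (['\n'] : List Char).reverse = ['\n'] from rfl]
    rw [show (['\n'] : List Char) ++ (List.dropWhile PySem.Chars.isspace s.toList).reverse
        = '\n' :: (List.dropWhile PySem.Chars.isspace s.toList).reverse from rfl]
    rw [List.dropWhile_cons_of_pos (show PySem.Chars.isspace '\n' = true by decide)]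

theorem pvCat_eq_join (seg : List String) (h : seg ≠ []) :
    pvCat seg = PySem.Str.join "\n" seg ++ "\n" := by
  induction seg with
  | nil => exact absurd rfl h
  | cons x rest ih =>
    cases rest with
    | nil =>
      show x ++ "\n" ++ pvCat [] = PySem.Str.join "\n" [x] ++ "\n"
      have hx : PySem.Str.join "\n" [x] = x := by
        apply String.ext
        rw [PySem.Str.toList_join]
        simp [PySem.Chars.join_singleton]
      rw [hx]
      simp [pvCat, String.append_empty]
    | cons y r =>
      have hys : (y :: r : List String) ≠ [] := by simp
      have hj : PySem.Str.join "\n" (x :: y :: r) = x ++ "\n" ++ PySem.Str.join "\n" (y :: r) := by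
        apply String.ext
        rw [PySem.Str.toList_join, String.toList_append, String.toList_append,
          PySem.Str.toList_join]
        simp [PySem.Chars.join_cons_cons]
      show x ++ "\n" ++ pvCat (y :: r) = _
      rw [ih hys, hj]
      simp [String.append_assoc]

theorem pvStrip_cat (seg : List String) :
    PySem.Str.strip (pvCat seg) = PySem.Str.strip (PySem.Str.join "\n" seg) := by
  cases seg with
  | nil =>
    have : PySem.Str.join "\n" ([] : List String) = "" := by
      apply String.ext
      rw [PySem.Str.toList_join]
      simp [PySem.Chars.join_nil]
    rw [this]
    rfl
  | cons x rest =>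
    rw [pvCat_eq_join (x :: rest) (by simp), pvStrip_append_nl]

-- ===== VERDICT (by name: the statement is the Claim_ definition above) =====
theorem separate_steps_spec : Claim_equal_separate_steps := by
  intro thoughts delims _
  unfold Spec_separate_steps
  rw [pvA_eq, pvB_eq, List.map_map]
  exact List.map_congr_left (fun seg _ => pvStrip_cat seg)
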